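-- pv_equiv track=rewrite | github.com/achoczaj/OCW--MIT-Programming_for_the_Puzzled | Puzzle_2-The_Best_Time_to_Party/partysmart.dev.py | chooseTime
-- ===== SOURCE A (Python) =====
-- def chooseTime(times):
--
--     rcount = 0
--     maxcount = 0
--     time = 0
--
--     #Range through the times computing a running count of celebrities
--     for t in times:
--         if t[1] == 'start':
--             rcount = rcount + 1
--         elif t[1] == 'end':
--             rcount = rcount - 1
--         if rcount > maxcount:
--             maxcount = rcount
--             time = t[0]
--
--     return maxcount, time
-- ===== SOURCE B (Python) =====
-- def chooseTime(times):
--     # Pass 1: table of (time, running count after the event)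
--     counts = []
--     c = 0
--     for t in times:
--         if t[1] == 'start':
--             c += 1
--         elif t[1] == 'end':
--             c -= 1
--         counts.append((t[0], c))
--     # Pass 2: maximum count; <= 0 means the default answer
--     best = max((c for _, c in counts), default=0)
--     if best <= 0:
--         return 0, 0
--     # Pass 3: first time at which the maximum is attained
--     when = next(t for t, c in counts if c == best)
--     return best, when
-- ===== Notes on version B (the rewrite author's own statement) =====
-- stated objective: alternative
-- what changed: B separates the work into building a (time, running-count) table, taking its maximum, and locating the first time attaining it, instead of A's single fused loop with strict-greater updates.
import Mathlib
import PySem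

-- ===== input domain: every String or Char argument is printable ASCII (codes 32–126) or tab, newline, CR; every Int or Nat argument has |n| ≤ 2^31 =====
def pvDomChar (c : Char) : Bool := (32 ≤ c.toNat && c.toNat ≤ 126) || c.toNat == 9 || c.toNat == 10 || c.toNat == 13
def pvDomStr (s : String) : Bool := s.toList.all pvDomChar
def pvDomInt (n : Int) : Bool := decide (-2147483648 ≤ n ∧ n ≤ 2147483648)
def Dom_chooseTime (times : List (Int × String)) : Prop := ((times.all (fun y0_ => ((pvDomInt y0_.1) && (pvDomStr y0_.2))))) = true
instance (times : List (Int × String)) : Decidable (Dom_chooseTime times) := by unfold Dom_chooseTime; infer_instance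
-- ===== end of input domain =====

-- B replaces A's fused loop by three separated passes (count table, maximum, first attaining time); alternative decomposition, same O(n) cost.


-- ===== PORT A =====
-- one loop step of A: state (rcount, maxcount, time)
def stepA (st : Int × Int × Int) (t : Int × String) : Int × Int × Int :=
  let rcount := if t.2 = "start" then st.1 + 1 else if t.2 = "end" then st.1 - 1 else st.1
  if rcount > st.2.1 then (rcount, rcount, t.1) else (rcount, st.2.1, st.2.2)

def chooseTime (times : List (Int × String)) : Int × Int :=
  (times.foldl stepA (0, 0, 0)).2

-- ===== PORT B =====
def deltaB (s : String) : Int := if s = "start" then 1 else if s = "end" then -1 else 0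

-- pass 1: the (time, running count) table
def tableB (c : Int) : List (Int × String) → List (Int × Int)
  | [] => []
  | t :: rest => (t.1, c + deltaB t.2) :: tableB (c + deltaB t.2) rest

-- pass 3: first time whose count equals best (Python's next(); the default 0 is
-- unreachable in B since a positive best is attained in the table)
def firstAt (tb : List (Int × Int)) (best : Int) : Int :=
  match tb.find? (fun p => p.2 == best) with
  | some p => p.1
  | none => 0

def chooseTime_alt (times : List (Int × String)) : Int × Int :=
  let counts := tableB 0 times
  -- pass 2: Python max(..., default=0)
  let best := match counts.map Prod.snd with
    | [] => 0
    | h :: tl => tl.foldl max h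
  if best ≤ 0 then (0, 0) else (best, firstAt counts best)

-- ===== PRECONDITION & SPEC =====
def Spec_chooseTime (times : List (Int × String)) (out : Int × Int) : Prop := out = chooseTime_alt times
instance (times : List (Int × String)) (out : Int × Int) : Decidable (Spec_chooseTime times out) := by unfold Spec_chooseTime; infer_instance

-- ===== CLAIM (what is proved, stated in full; the proofs are below) =====
def Claim_equal_chooseTime : Prop := ∀ (times : List (Int × String)), Dom_chooseTime times → Spec_chooseTime times (chooseTime times)

-- ===== LEMMAS AND PROOFS =====

theorem le_foldl_max : ∀ (l : List Int) (a b : Int), a ≤ b → a ≤ l.foldl max b := by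
  intro l
  induction l with
  | nil => intro a b h; simpa using h
  | cons c l ih =>
    intro a b h
    exact ih a (max b c) (le_trans h (le_max_left _ _))

theorem foldl_max_comm : ∀ (l : List Int) (a b : Int),
    l.foldl max (max a b) = max a (l.foldl max b) := by
  intro l
  induction l with
  | nil => intro a b; rfl
  | cons c l ih =>
    intro a b
    simp only [List.foldl_cons, max_assoc, ih]

-- rcount update of A's step equals adding deltaB
theorem rcount_eq_delta (r : Int) (s : String) :
    (if s = "start" then r + 1 else if s = "end" then r - 1 else r) = r + deltaB s := by
  unfold deltaB; split_ifs <;> omega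

-- characterisation of A's fold: its (maxcount, time) part is the maximum of the
-- count table (over base m) and the first time attaining it
theorem loopA_char : ∀ (rest : List (Int × String)) (r m t : Int),
    (rest.foldl stepA (r, m, t)).2 =
      (if ((tableB r rest).map Prod.snd).foldl max m > m
       then (((tableB r rest).map Prod.snd).foldl max m,
             firstAt (tableB r rest) (((tableB r rest).map Prod.snd).foldl max m))
       else (m, t)) := by
  intro rest
  induction rest with
  | nil => intro r m t; simp [tableB]
  | cons x rest ih =>
    intro r m t
    simp only [List.foldl_cons, tableB, List.map_cons]
    rw [stepA, rcount_eq_delta]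
    set r' := r + deltaB x.2 with hr'
    by_cases hgt : r' > m
    · have hmax : max m r' = r' := max_eq_right (le_of_lt hgt)
      rw [if_pos hgt, ih, hmax]
      set M := ((tableB r' rest).map Prod.snd).foldl max r' with hM
      have hMr : r' ≤ M := le_foldl_max _ _ _ le_rfl
      rw [if_pos (lt_of_lt_of_le hgt hMr)]
      by_cases hM' : M > r'
      · rw [if_pos hM']
        have hfa : firstAt ((x.1, r') :: tableB r' rest) M = firstAt (tableB r' rest) M := by
          unfold firstAt
          rw [List.find?_cons_of_neg]
          simp only [beq_iff_eq]
          exact ne_of_lt hM'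
        rw [hfa]
      · have hMeq : M = r' := le_antisymm (not_lt.mp hM') hMr
        rw [if_neg hM']
        have hfa : firstAt ((x.1, r') :: tableB r' rest) M = x.1 := by
          unfold firstAt
          rw [List.find?_cons_of_pos]
          simp [hMeq]
        rw [hfa, hMeq]
    · have hmax : max m r' = m := max_eq_left (not_lt.mp hgt)
      rw [if_neg hgt, ih, hmax]
      set M := ((tableB r' rest).map Prod.snd).foldl max m with hM
      by_cases hM' : M > m
      · rw [if_pos hM', if_pos hM']
        have hfa : firstAt ((x.1, r') :: tableB r' rest) M = firstAt (tableB r' rest) M := by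
          unfold firstAt
          rw [List.find?_cons_of_neg]
          simp only [beq_iff_eq]
          exact ne_of_lt (lt_of_le_of_lt (not_lt.mp hgt) hM')
        rw [hfa]
      · rw [if_neg hM', if_neg hM']

-- ===== VERDICT (by name: the statement is the Claim_ definition above) =====
theorem chooseTime_spec : Claim_equal_chooseTime := by
  intro times _
  unfold Spec_chooseTime chooseTime chooseTime_alt
  rw [loopA_char]
  cases h : (tableB 0 times).map Prod.snd with
  | nil =>
    simp only [h, List.foldl_nil]
    rw [if_neg (by omega : ¬ (0:Int) > 0), if_pos (le_refl (0:Int))]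
  | cons c tl =>
    simp only [h, List.foldl_cons]
    rw [show ((0 : Int)) ⊔ c = max 0 c from rfl, foldl_max_comm]
    set best := tl.foldl max c with hb
    by_cases hpos : best ≤ 0
    · have hng : ¬ max (0 : Int) best > 0 := by
        simp only [gt_iff_lt, not_lt]
        exact max_le le_rfl hpos
      rw [if_neg hng, if_pos hpos]
    · have h0 : (0 : Int) < best := not_le.mp hpos
      have hmx : max (0 : Int) best = best := max_eq_right h0.le
      rw [hmx, if_pos h0, if_neg hpos]
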